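-- pv_equiv track=rewrite | github.com/meettheqa-ast/Salesforce-Core-Automation | ai_bridge.py | strip_credential_variable_overrides
-- ===== SOURCE A (Python) =====
-- CREDENTIAL_SUITE_VARS = (
--     "${globalSandboxTestUrl}",
--     "${sandboxUserNameInput}",
--     "${sandboxPasswordInput}",
-- )
--
-- def strip_credential_variable_overrides(robot_source: str) -> str:
--     """
--     Remove *** Variables *** lines that redefine sandbox URL / login fields.
--
--     The LLM often emits ${globalSandboxTestUrl}    ${null} etc.; those override
--     EnvData.robot (first-wins in suite scope) and Selenium then navigates to None.
--     """
--     lines = robot_source.splitlines()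
--     out: list[str] = []
--     in_variables = False
--     for line in lines:
--         stripped = line.strip()
--         if stripped.startswith("***") and stripped.replace(" ", "") == "***Variables***":
--             in_variables = True
--             out.append(line)
--             continue
--         if stripped.startswith("***") and in_variables:
--             in_variables = False
--         if in_variables:
--             lead = line.lstrip()
--             if any(lead.startswith(name) for name in CREDENTIAL_SUITE_VARS):
--                 continue
--         out.append(line)
--     return "\n".join(out) + ("\n" if robot_source.endswith("\n") else "")
-- ===== SOURCE B (Python) =====
-- CREDENTIAL_SUITE_VARS = (
--     "${globalSandboxTestUrl}",
--     "${sandboxUserNameInput}",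
--     "${sandboxPasswordInput}",
-- )
--
--
-- def _is_header(line):
--     return line.strip().startswith("***")
--
--
-- def _is_vars_header(line):
--     s = line.strip()
--     return s.startswith("***") and s.replace(" ", "") == "***Variables***"
--
--
-- def _is_cred(line):
--     lead = line.lstrip()
--     return any(lead.startswith(name) for name in CREDENTIAL_SUITE_VARS)
--
--
-- def strip_credential_variable_overrides(robot_source: str) -> str:
--     # Section-grouping decomposition: split the lines into a preamble group and
--     # one group per '***' header, then filter only the Variables groups.
--     groups = []
--     cur = []
--     for line in robot_source.splitlines():
--         if _is_header(line):
--             groups.append(cur)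
--             cur = [line]
--         else:
--             cur.append(line)
--     groups.append(cur)
--
--     kept = []
--     for g in groups:
--         if g and _is_vars_header(g[0]):
--             kept.append(g[0])
--             kept.extend(l for l in g[1:] if not _is_cred(l))
--         else:
--             kept.extend(g)
--     return "\n".join(kept) + ("\n" if robot_source.endswith("\n") else "")
-- ===== Notes on version B (the rewrite author's own statement) =====
-- stated objective: alternative
-- what changed: Replaces A's single scan carrying an in_variables flag by a two-phase section decomposition: lines are first grouped under their section-header lines (the preamble kept as an initial group), then only groups headed by a Variables header have their credential-override body lines filtered out.
import Mathlib
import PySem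

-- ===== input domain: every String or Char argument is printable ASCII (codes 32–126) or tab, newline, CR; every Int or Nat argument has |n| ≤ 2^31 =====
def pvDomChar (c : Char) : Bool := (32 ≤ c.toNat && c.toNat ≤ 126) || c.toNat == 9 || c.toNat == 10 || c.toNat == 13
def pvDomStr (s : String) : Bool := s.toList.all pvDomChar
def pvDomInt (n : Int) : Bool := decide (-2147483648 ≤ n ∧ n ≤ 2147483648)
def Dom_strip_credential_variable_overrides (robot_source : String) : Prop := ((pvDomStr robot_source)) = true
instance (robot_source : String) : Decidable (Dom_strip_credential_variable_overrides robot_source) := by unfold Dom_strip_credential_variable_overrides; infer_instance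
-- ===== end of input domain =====

-- B replaces A's flag-carrying single scan by a section-grouping pass (group lines
-- under their '***' headers, filter only the Variables groups); objective: alternative.

def CREDENTIAL_SUITE_VARS : List String :=
  ["${globalSandboxTestUrl}", "${sandboxUserNameInput}", "${sandboxPasswordInput}"]

-- ===== PORT A =====
-- the body of A's for-loop, named so the fold stays readable
def aStep (st : List String × Bool) (line : String) : List String × Bool :=
  let out := st.1
  let in_variables := st.2
  let stripped := PySem.Str.strip line
  if PySem.Str.startswith stripped "***" &&
      (PySem.Str.replace stripped " " "" == "***Variables***") then
    (out ++ [line], true)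
  else
    let in_variables :=
      if PySem.Str.startswith stripped "***" && in_variables then false else in_variables
    if in_variables then
      let lead := PySem.Str.lstrip line
      if CREDENTIAL_SUITE_VARS.any (fun name => PySem.Str.startswith lead name) then
        (out, in_variables)
      else (out ++ [line], in_variables)
    else (out ++ [line], in_variables)

def strip_credential_variable_overrides (robot_source : String) : String :=
  let lines := PySem.Str.splitlines robot_source
  let res := lines.foldl aStep ([], false)
  PySem.Str.join "\n" res.1 ++ (if PySem.Str.endswith robot_source "\n" then "\n" else "")

-- ===== PORT B =====
def isHeaderB (line : String) : Bool :=
  PySem.Str.startswith (PySem.Str.strip line) "***"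

def isVarsHeaderB (line : String) : Bool :=
  let s := PySem.Str.strip line
  PySem.Str.startswith s "***" && (PySem.Str.replace s " " "" == "***Variables***")

def isCredB (line : String) : Bool :=
  let lead := PySem.Str.lstrip line
  CREDENTIAL_SUITE_VARS.any (fun name => PySem.Str.startswith lead name)

def grpStep (st : List (List String) × List String) (line : String) :
    List (List String) × List String :=
  if isHeaderB line then (st.1 ++ [st.2], [line]) else (st.1, st.2 ++ [line])

def keptStep (kept : List String) (g : List String) : List String :=
  match g with
  | [] => kept
  | h :: body =>
    if isVarsHeaderB h then kept ++ [h] ++ body.filter (fun l => !isCredB l)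
    else kept ++ (h :: body)

def strip_credential_variable_overrides_alt (robot_source : String) : String :=
  let st := (PySem.Str.splitlines robot_source).foldl grpStep ([], [])
  let groups := st.1 ++ [st.2]
  let kept := groups.foldl keptStep []
  PySem.Str.join "\n" kept ++ (if PySem.Str.endswith robot_source "\n" then "\n" else "")

-- ===== PRECONDITION & SPEC =====
def Spec_strip_credential_variable_overrides (robot_source : String) (out : String) : Prop := out = strip_credential_variable_overrides_alt robot_source
instance (robot_source : String) (out : String) : Decidable (Spec_strip_credential_variable_overrides robot_source out) := by unfold Spec_strip_credential_variable_overrides; infer_instance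

-- ===== CLAIM (what is proved, stated in full; the proofs are below) =====
def Claim_equal_strip_credential_variable_overrides : Prop := ∀ (robot_source : String), Dom_strip_credential_variable_overrides robot_source → Spec_strip_credential_variable_overrides robot_source (strip_credential_variable_overrides robot_source)

-- ===== LEMMAS AND PROOFS =====

-- reference recursion: the filtered line list, flag-style
def specProc : List String → Bool → List String
  | [], _ => []
  | l :: ls, inv =>
    if isVarsHeaderB l then l :: specProc ls true
    else if isHeaderB l then l :: specProc ls false
    else if inv && isCredB l then specProc ls inv
    else l :: specProc ls inv

theorem aStep_vars {l : String} (h : isVarsHeaderB l = true) (out : List String) (inv : Bool) :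
    aStep (out, inv) l = (out ++ [l], true) := by
  simp only [isVarsHeaderB] at h
  simp only [aStep, h, if_true]

theorem aStep_hdr {l : String} (hv : isVarsHeaderB l = false) (hh : isHeaderB l = true)
    (out : List String) (inv : Bool) : aStep (out, inv) l = (out ++ [l], false) := by
  simp only [isVarsHeaderB] at hv
  simp only [isHeaderB] at hh
  have hr : (PySem.Str.replace (PySem.Str.strip l) " " "" == "***Variables***") = false := by
    rcases Bool.and_eq_false_iff.mp hv with h | h
    · rw [hh] at h; cases h
    · exact h
  cases inv <;> simp only [aStep, hh, hr, Bool.and_false, Bool.false_eq_true, if_false,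
    Bool.and_true, if_true]

theorem aStep_body {l : String} (hh : isHeaderB l = false) (out : List String) (inv : Bool) :
    aStep (out, inv) l = (if inv && isCredB l then out else out ++ [l], inv) := by
  simp only [isHeaderB] at hh
  cases inv <;> by_cases hc : isCredB l <;>
    simp only [isCredB] at hc <;>
    simp only [aStep, isCredB, hh, hc, Bool.false_and, Bool.and_false, Bool.and_true,
      Bool.false_eq_true, if_false, if_true]

-- A's loop computes out ++ specProc lines inv
theorem aLoop_eq (lines : List String) : ∀ (out : List String) (inv : Bool),
    (lines.foldl aStep (out, inv)).1 = out ++ specProc lines inv := by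
  induction lines with
  | nil => intro out inv; simp [specProc]
  | cons l ls ih =>
    intro out inv
    rw [List.foldl_cons]
    by_cases hv : isVarsHeaderB l
    · rw [aStep_vars hv, ih]
      simp [specProc, hv, List.append_assoc]
    · have hv' : isVarsHeaderB l = false := by simpa using hv
      by_cases hh : isHeaderB l
      · rw [aStep_hdr hv' hh, ih]
        simp [specProc, hv', hh, List.append_assoc]
      · have hh' : isHeaderB l = false := by simpa using hh
        rw [aStep_body hh', ih]
        by_cases hc : isCredB l <;> cases inv <;>
          simp [specProc, hv', hh', hc, List.append_assoc]

-- B-side reference recursions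
def grpB : List String → List String → List (List String)
  | cur, [] => [cur]
  | cur, l :: ls => if isHeaderB l then cur :: grpB [l] ls else grpB (cur ++ [l]) ls

def pgB : List String → List String
  | [] => []
  | h :: body =>
    if isVarsHeaderB h then h :: body.filter (fun l => !isCredB l) else h :: body

theorem grp_fold_eq (lines : List String) : ∀ (gs : List (List String)) (cur : List String),
    (lines.foldl grpStep (gs, cur)).1 ++ [(lines.foldl grpStep (gs, cur)).2]
      = gs ++ grpB cur lines := by
  induction lines with
  | nil => intro gs cur; simp [grpB]
  | cons l ls ih =>
    intro gs cur
    rw [List.foldl_cons]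
    by_cases h : isHeaderB l <;> simp [grpStep, h, grpB, ih, List.append_assoc]

theorem kept_fold_eq (gs : List (List String)) : ∀ (kept : List String),
    gs.foldl keptStep kept = kept ++ (gs.map pgB).flatten := by
  induction gs with
  | nil => intro kept; simp
  | cons g gs ih =>
    intro kept
    match g with
    | [] => simp [keptStep, pgB, ih]
    | h :: body =>
      by_cases hv : isVarsHeaderB h <;>
        simp [keptStep, pgB, hv, ih, List.append_assoc]

def curFlag : List String → Bool
  | [] => false
  | h :: _ => isVarsHeaderB h

-- main bridge: group-then-filter = flag-carrying scan
theorem groups_eq_spec (lines : List String) : ∀ (cur : List String),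
    ((grpB cur lines).map pgB).flatten = pgB cur ++ specProc lines (curFlag cur) := by
  induction lines with
  | nil => intro cur; simp [grpB, specProc]
  | cons l ls ih =>
    intro cur
    by_cases hh : isHeaderB l
    · have hgrp : grpB cur (l :: ls) = cur :: grpB [l] ls := by
        simp only [grpB, hh, if_true]
      rw [hgrp]
      simp only [List.map_cons, List.flatten_cons, ih [l]]
      by_cases hv : isVarsHeaderB l
      · simp [pgB, hv, specProc, curFlag]
      · have hv' : isVarsHeaderB l = false := by simpa using hv
        simp [pgB, hv', hh, specProc, curFlag]
    · have hh' : isHeaderB l = false := by simpa using hh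
      have hv' : isVarsHeaderB l = false := by
        simp only [isVarsHeaderB, Bool.and_eq_false_iff]
        left
        simpa only [isHeaderB] using hh'
      have hgrp : grpB cur (l :: ls) = grpB (cur ++ [l]) ls := by
        simp only [grpB, hh', Bool.false_eq_true, if_false]
      rw [hgrp, ih (cur ++ [l])]
      cases cur with
      | nil => simp [pgB, curFlag, hv', specProc, hh']
      | cons h body =>
        by_cases hvh : isVarsHeaderB h
        · by_cases hc : isCredB l <;>
            simp [pgB, curFlag, hvh, hv', hh', hc, specProc, List.filter_append,
              List.append_assoc]
        · have hvh' : isVarsHeaderB h = false := by simpa using hvh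
          simp [pgB, curFlag, hvh', hv', hh', specProc, List.append_assoc]

-- ===== VERDICT (by name: the statement is the Claim_ definition above) =====
theorem strip_credential_variable_overrides_spec : Claim_equal_strip_credential_variable_overrides := by
  intro robot_source _
  unfold Spec_strip_credential_variable_overrides
  simp only [strip_credential_variable_overrides, strip_credential_variable_overrides_alt]
  rw [aLoop_eq, kept_fold_eq, grp_fold_eq]
  simp only [List.nil_append]
  rw [groups_eq_spec]
  simp [pgB, curFlag]
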